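-- pv_equiv track=rewrite | github.com/kleinerdolan/Advent-of-Code-2021 | 03/day3.py | determine_least_common
-- ===== SOURCE A (Python) =====
-- def determine_least_common(lines, index):
--     delete_these_lines = []
--     if lines[index].count("1") > lines[index].count("0"):
--         for letter_index in range(len(lines[index])):
--             if lines[index][letter_index] == "0":
--                 delete_these_lines.append(letter_index)
--     else:
--         for letter_index in range(len(lines[index])):
--             if lines[index][letter_index] == "1":
--                 delete_these_lines.append(letter_index)
--     return delete_these_lines
-- ===== SOURCE B (Python) =====
-- def determine_least_common(lines, index):
--     zeros = []
--     ones = []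
--     for i, ch in enumerate(lines[index]):
--         if ch == "0":
--             zeros.append(i)
--         elif ch == "1":
--             ones.append(i)
--     return zeros if len(ones) > len(zeros) else ones
-- ===== Notes on version B (the rewrite author's own statement) =====
-- stated objective: simpler
-- what changed: One pass over enumerate(lines[index]) builds the index lists of '0'- and '1'-positions simultaneously (their lengths are the counts), then picks the minority list at the end, replacing A's two .count() scans plus a separate index-selection loop over range(len).
import Mathlib
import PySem

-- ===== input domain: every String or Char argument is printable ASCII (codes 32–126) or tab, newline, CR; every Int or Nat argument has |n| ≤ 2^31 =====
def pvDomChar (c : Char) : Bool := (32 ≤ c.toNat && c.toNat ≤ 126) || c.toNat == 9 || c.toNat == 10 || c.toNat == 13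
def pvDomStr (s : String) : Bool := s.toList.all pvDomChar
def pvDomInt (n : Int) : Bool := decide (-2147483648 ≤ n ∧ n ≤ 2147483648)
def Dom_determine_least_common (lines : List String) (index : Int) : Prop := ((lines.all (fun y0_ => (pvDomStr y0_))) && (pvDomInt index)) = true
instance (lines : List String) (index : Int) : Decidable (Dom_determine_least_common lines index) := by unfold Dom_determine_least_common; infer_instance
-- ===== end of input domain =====

-- B replaces A's two .count() scans plus a separate selection loop by ONE pass over
-- enumerate(lines[index]) that builds both position lists, then a constant-time choice.


-- ===== PORT A =====
-- lines[index] raises IndexError outside Pre_; there the port returns [] (unclaimed).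
def determine_least_common (lines : List String) (index : Int) : List Int :=
  match PySem.List.pyGet? lines index with
  | none => []
  | some s =>
    if PySem.Str.count s "1" > PySem.Str.count s "0" then
      (PySem.List.pyRange 0 (PySem.Str.len s) 1).foldl
        (fun acc li => if PySem.List.pyGetD s.toList li ' ' = '0' then acc ++ [li] else acc) []
    else
      (PySem.List.pyRange 0 (PySem.Str.len s) 1).foldl
        (fun acc li => if PySem.List.pyGetD s.toList li ' ' = '1' then acc ++ [li] else acc) []

-- ===== PORT B =====
def determine_least_common_alt (lines : List String) (index : Int) : List Int :=
  match PySem.List.pyGet? lines index with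
  | none => []
  | some s =>
    let zo := (PySem.List.enumerate s.toList).foldl
      (fun (zo : List Int × List Int) p =>
        if p.2 = '0' then (zo.1 ++ [p.1], zo.2)
        else if p.2 = '1' then (zo.1, zo.2 ++ [p.1])
        else zo) ([], [])
    if zo.2.length > zo.1.length then zo.1 else zo.2

-- ===== PRECONDITION & SPEC =====
-- Pre_ excludes exactly the inputs where lines[index] raises IndexError.
def Pre_determine_least_common (lines : List String) (index : Int) : Prop :=
  PySem.Raise.InRange lines.length index
instance (lines : List String) (index : Int) : Decidable (Pre_determine_least_common lines index) := by unfold Pre_determine_least_common; infer_instance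
def pvWitness_determine_least_common : List String × Int := (["0110", "111"], 0)

def Spec_determine_least_common (lines : List String) (index : Int) (out : List Int) : Prop := out = determine_least_common_alt lines index
instance (lines : List String) (index : Int) (out : List Int) : Decidable (Spec_determine_least_common lines index out) := by unfold Spec_determine_least_common; infer_instance

-- ===== CLAIM (what is proved, stated in full; the proofs are below) =====
def Claim_equal_determine_least_common : Prop := ∀ (lines : List String) (index : Int), Dom_determine_least_common lines index → Pre_determine_least_common lines index → Spec_determine_least_common lines index (determine_least_common lines index)

-- ===== LEMMAS AND PROOFS =====

-- B's single-pass fold, characterised: it appends to the two accumulators the indices of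
-- the '0'- and '1'-positions of (enumerate cs s).
lemma alt_fold_eq (cs : List Char) (s : Int) (z o : List Int) :
    (PySem.List.enumerate cs s).foldl
      (fun (zo : List Int × List Int) p =>
        if p.2 = '0' then (zo.1 ++ [p.1], zo.2)
        else if p.2 = '1' then (zo.1, zo.2 ++ [p.1])
        else zo) (z, o)
    = (z ++ (((PySem.List.enumerate cs s).filter (fun p => p.2 == '0')).map (·.1)),
       o ++ (((PySem.List.enumerate cs s).filter (fun p => p.2 == '1')).map (·.1))) := by
  induction cs generalizing s z o with
  | nil => simp [PySem.List.enumerate_nil]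
  | cons c cs ih =>
      rw [PySem.List.enumerate_cons]
      by_cases h0 : c = '0'
      · simp [h0, List.foldl_cons, ih]
      · by_cases h1 : c = '1'
        · simp [h1, List.foldl_cons, ih]
        · simp [h0, h1, List.foldl_cons, ih]

-- A's selection loop, characterised the same way.
lemma a_loop_eq (cs : List Char) (c : Char) :
    (PySem.List.pyRange 0 (cs.length : Int) 1).foldl
      (fun acc li => if PySem.List.pyGetD cs li ' ' = c then acc ++ [li] else acc) []
    = ((PySem.List.enumerate cs).filter (fun p => p.2 == c)).map (·.1) := by
  rw [PySem.List.foldl_append_ite_eq_filter]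
  rw [PySem.List.enumerate_eq_map_pyRange cs ' ']
  rw [List.filter_map, List.map_map]
  have hp : ((fun (p : Int × Char) => p.2 == c) ∘ fun j => (j, PySem.List.pyGetD cs j ' '))
      = fun li => decide (PySem.List.pyGetD cs li ' ' = c) := by
    funext j
    simp only [Function.comp_apply]
    rw [Bool.eq_iff_iff, beq_iff_eq, decide_eq_true_iff]
  have hf : ((fun (p : Int × Char) => p.1) ∘ fun j => (j, PySem.List.pyGetD cs j ' '))
      = fun (j : Int) => j := by
    funext j; rfl
  rw [hp, hf, List.map_id']
  simp

lemma count_go_singleton (c : Char) (l : List Char) (fuel acc : Nat) (h : l.length <= fuel) :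
    PySem.Chars.count.go [c] fuel l acc = acc + l.count c := by
  induction l generalizing fuel acc with
  | nil => cases fuel <;> simp [PySem.Chars.count.go]
  | cons x t ih =>
      cases fuel with
      | zero => simp at h
      | succ n =>
          have hlen : t.length <= n := by simpa using h
          rw [show PySem.Chars.count.go [c] (n + 1) (x :: t) acc
              = if [c].isPrefixOf (x :: t) = true then PySem.Chars.count.go [c] n t (acc + 1)
                else PySem.Chars.count.go [c] n t acc from rfl]
          by_cases hx : c = x
          · rw [if_pos (by simp [List.isPrefixOf, hx]), ih n (acc + 1) hlen]
            simp [hx]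
            omega
          · rw [if_neg (by simp [List.isPrefixOf, hx]), ih n acc hlen]
            simp [Ne.symm hx]

lemma count_eq_filter_len (cs : List Char) (c : Char) :
    PySem.Chars.count cs [c]
    = (((PySem.List.enumerate cs).filter (fun p => p.2 == c)).map (·.1)).length := by
  unfold PySem.Chars.count
  rw [if_neg (by simp)]
  rw [count_go_singleton c cs cs.length 0 le_rfl]
  rw [List.length_map, <- List.countP_eq_length_filter]
  have : cs.count c = (PySem.List.enumerate cs).countP (fun p => p.2 == c) := by
    conv_lhs => rw [<- PySem.List.map_snd_enumerate cs 0]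
    rw [List.count_eq_countP, List.countP_map]
    rfl
  omega

-- ===== VERDICT (by name: the statement is the Claim_ definition above) =====
theorem determine_least_common_spec : Claim_equal_determine_least_common := by
  intro lines index _ hpre
  unfold Spec_determine_least_common determine_least_common determine_least_common_alt
  obtain ⟨s, hs⟩ : ∃ s, PySem.List.pyGet? lines index = some s := by
    cases h : PySem.List.pyGet? lines index with
    | none => exact absurd hpre (by simpa [PySem.List.pyGet?_eq_none_iff] using h)
    | some s => exact ⟨s, rfl⟩
  rw [hs]
  simp only [alt_fold_eq s.toList 0 [] []]
  rw [PySem.Str.count_eq, PySem.Str.count_eq]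
  simp only [PySem.Str.len_eq]
  rw [a_loop_eq, a_loop_eq]
  rw [show ("1" : String).toList = ['1'] from rfl, show ("0" : String).toList = ['0'] from rfl]
  rw [count_eq_filter_len, count_eq_filter_len]
  simp only [List.nil_append]
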